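-- pv_equiv track=rewrite | github.com/TimeB1729/codeforces | round 1032 (div 3)/pC.py | ourfunc
-- ===== SOURCE A (Python) =====
-- def ourfunc(t, test_cases):
--     results=[]
--     for case in test_cases:
--         n,m,a = case
--         max_a = max(max(a[i]) for i in range(n))
--         r_max = [0]*n
--         c_max = [0]*m
--         count_max = 0
--         for i in range(n):
--             for j in range(m):
--                 if a[i][j] == max_a:
--                     count_max+=1
--                     r_max[i]+=1
--                     c_max[j]+=1
--
--         res = max_a
--         for i in range(n):
--             for j in range(m):
--                 if (r_max[i] + c_max[j] - (a[i][j] == max_a)) == count_max: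
--                     res = max_a - 1
--                     break
--
--         results.append(res)
--
--     return results
-- ===== SOURCE B (Python) =====
-- def _solve(n, m, a):
--     max_a = max(max(a[i]) for i in range(n))
--     P = [(i, j) for i in range(n) for j in range(m) if a[i][j] == max_a]
--     covered = any(all(p[0] == i or p[1] == j for p in P)
--                   for i in range(n) for j in range(m))
--     return max_a - 1 if covered else max_a
--
-- def ourfunc(t, test_cases):
--     return [_solve(n, m, a) for (n, m, a) in test_cases]
-- ===== Notes on version B (the rewrite author's own statement) =====
-- stated objective: alternative
-- what changed: B drops the r_max/c_max count arrays and the inclusion-exclusion count identity: it collects the list of positions of the maximum and tests directly, with any/all over cells, whether one row+column covers them all.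
import Mathlib
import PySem

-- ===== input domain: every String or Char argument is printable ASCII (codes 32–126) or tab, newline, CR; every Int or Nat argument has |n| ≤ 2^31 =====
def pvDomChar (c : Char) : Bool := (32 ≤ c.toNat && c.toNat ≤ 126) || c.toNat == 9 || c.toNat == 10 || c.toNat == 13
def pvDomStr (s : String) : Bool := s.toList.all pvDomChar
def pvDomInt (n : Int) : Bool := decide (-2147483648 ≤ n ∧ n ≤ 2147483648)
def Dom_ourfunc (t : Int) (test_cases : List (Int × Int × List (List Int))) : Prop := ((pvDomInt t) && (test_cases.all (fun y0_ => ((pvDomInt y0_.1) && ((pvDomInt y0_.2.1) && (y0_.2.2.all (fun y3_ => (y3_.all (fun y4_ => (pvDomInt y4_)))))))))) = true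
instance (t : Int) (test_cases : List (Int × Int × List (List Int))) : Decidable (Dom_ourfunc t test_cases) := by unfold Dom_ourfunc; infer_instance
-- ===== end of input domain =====

-- B replaces A's r_max/c_max count arrays and inclusion-exclusion count identity by a direct
-- any/all cover test over the collected list of positions of the maximum (objective: alternative).

-- ===== PORT A =====
-- max(max(a[i]) for i in range(n))  (identical line in both Pythons, ported once)
def pvMaxA (n : Int) (a : List (List Int)) : Int :=
  (PySem.List.max? ((PySem.List.pyRange 0 n 1).map (fun i =>
    (PySem.List.max? (PySem.List.pyGetD a i []) (fun y => y)).getD 0)) (fun y => y)).getD 0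

-- a[i][j]  (identical expression in both Pythons, ported once)
def pvVal (a : List (List Int)) (i j : Int) : Int :=
  PySem.List.pyGetD (PySem.List.pyGetD a i []) j 0

-- the inner 'for j in range(m): if cond: res = max_a - 1; break' loop of A
def pvScanJ (maxA : Int) (cond : Int → Bool) : List Int → Int → Int
  | [], res => res
  | j :: js, res => if cond j then maxA - 1 else pvScanJ maxA cond js res

def pvCaseA (c : Int × Int × List (List Int)) : Int :=
  let n := c.1
  let m := c.2.1
  let a := c.2.2
  let maxA := pvMaxA n a
  -- st = (count_max, r_max, c_max) after the first nested loop
  let st := (PySem.List.pyRange 0 n 1).foldl (fun st i =>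
      (PySem.List.pyRange 0 m 1).foldl (fun st j =>
        if pvVal a i j == maxA then
          (st.1 + 1,
           PySem.List.pySetD st.2.1 i (PySem.List.pyGetD st.2.1 i 0 + 1),
           PySem.List.pySetD st.2.2 j (PySem.List.pyGetD st.2.2 j 0 + 1))
        else st) st)
    ((0 : Int), PySem.List.pyRepeat [(0 : Int)] n, PySem.List.pyRepeat [(0 : Int)] m)
  (PySem.List.pyRange 0 n 1).foldl (fun res i =>
    pvScanJ maxA (fun j =>
      PySem.List.pyGetD st.2.1 i 0 + PySem.List.pyGetD st.2.2 j 0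
        - (if pvVal a i j == maxA then 1 else 0) == st.1)
      (PySem.List.pyRange 0 m 1) res) maxA

def ourfunc (t : Int) (test_cases : List (Int × Int × List (List Int))) : List Int :=
  test_cases.foldl (fun acc c => acc ++ [pvCaseA c]) []

-- ===== PORT B =====
def pvSolve (n m : Int) (a : List (List Int)) : Int :=
  let maxA := pvMaxA n a
  let P := (PySem.List.pyRange 0 n 1).flatMap (fun i =>
    ((PySem.List.pyRange 0 m 1).filter (fun j => pvVal a i j == maxA)).map (fun j => (i, j)))
  let covered := (PySem.List.pyRange 0 n 1).any (fun i =>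
    (PySem.List.pyRange 0 m 1).any (fun j => P.all (fun p => p.1 == i || p.2 == j)))
  if covered then maxA - 1 else maxA

def ourfunc_alt (t : Int) (test_cases : List (Int × Int × List (List Int))) : List Int :=
  test_cases.map (fun c => pvSolve c.1 c.2.1 c.2.2)

-- ===== PRECONDITION & SPEC =====
-- Pre_ excludes exactly the inputs where the Python A raises (max() of an empty sequence for
-- n ≤ 0 or an empty row, IndexError for n > len(a) or a row shorter than m).
def Pre_ourfunc (t : Int) (test_cases : List (Int × Int × List (List Int))) : Prop :=
  ∀ c ∈ test_cases, 0 < c.1 ∧ c.1 ≤ (c.2.2.length : Int) ∧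
    ∀ row ∈ c.2.2.take c.1.toNat, row ≠ [] ∧ c.2.1 ≤ (row.length : Int)
instance (t : Int) (test_cases : List (Int × Int × List (List Int))) : Decidable (Pre_ourfunc t test_cases) := by unfold Pre_ourfunc; infer_instance

def pvWitness_ourfunc : Int × (List (Int × Int × List (List Int))) := (1, [(2, 2, [[1, 3], [3, 2]])])

def Spec_ourfunc (t : Int) (test_cases : List (Int × Int × List (List Int))) (out : List Int) : Prop := out = ourfunc_alt t test_cases
instance (t : Int) (test_cases : List (Int × Int × List (List Int))) (out : List Int) : Decidable (Spec_ourfunc t test_cases out) := by unfold Spec_ourfunc; infer_instance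

-- ===== CLAIM (what is proved, stated in full; the proofs are below) =====
def Claim_equal_ourfunc : Prop := ∀ (t : Int) (test_cases : List (Int × Int × List (List Int))), Dom_ourfunc t test_cases → Pre_ourfunc t test_cases → Spec_ourfunc t test_cases (ourfunc t test_cases)

-- ===== LEMMAS AND PROOFS =====

theorem pv_scanJ_eq (maxA : Int) (cond : Int → Bool) (js : List Int) (res : Int) :
    pvScanJ maxA cond js res = if js.any cond then maxA - 1 else res := by
  induction js with
  | nil => simp [pvScanJ]
  | cons j js ih => by_cases h : cond j <;> simp [pvScanJ, h, ih]

theorem pv_foldl_if_const {α β : Type} (l : List α) (p : α → Bool) (v : β) (init : β) :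
    l.foldl (fun acc x => if p x then v else acc) init = if l.any p then v else init := by
  induction l generalizing init with
  | nil => simp
  | cons x l ih => by_cases h : p x <;> simp [h, ih]

theorem pv_foldl_flatMap {α β γ : Type} (l : List α) (f : α → List β) (g : γ → β → γ) (init : γ) :
    (l.flatMap f).foldl g init = l.foldl (fun acc x => (f x).foldl g acc) init := by
  induction l generalizing init with
  | nil => rfl
  | cons x l ih => simp [List.flatMap_cons, List.foldl_append, ih]

theorem pv_countP_union {α : Type} (l : List α) (p q : α → Bool) :
    l.countP (fun x => p x || q x) + l.countP (fun x => p x && q x) = l.countP p + l.countP q := by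
  induction l with
  | nil => simp
  | cons x l ih => by_cases hp : p x <;> by_cases hq : q x <;>
      simp [hp, hq] <;> omega

theorem pv_any_congr_mem {α : Type} (l : List α) (f g : α → Bool)
    (h : ∀ x ∈ l, f x = g x) : l.any f = l.any g := by
  induction l with
  | nil => rfl
  | cons x l ih => simp only [List.any_cons, h x (by simp), ih (fun y hy => h y (by simp [hy]))]

theorem pv_pyGetD_oob (xs : List Int) (i : Int) (h : (xs.length : Int) ≤ i) :
    PySem.List.pyGetD xs i 0 = 0 := by
  have h0 : 0 ≤ i := le_trans (by positivity) h
  rw [show i = ((i.toNat : Nat) : Int) by omega, PySem.List.pyGetD_natCast]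
  apply List.getD_eq_default
  omega

theorem pv_pyGetD_pySetD (r : List Int) (i0 i v : Int)
    (h0 : 0 ≤ i0) (h1 : i0 < (r.length : Int)) (hi : 0 ≤ i) :
    PySem.List.pyGetD (PySem.List.pySetD r i0 v) i 0
      = if i = i0 then v else PySem.List.pyGetD r i 0 := by
  rw [PySem.List.pySetD_of_nonneg r v h0]
  by_cases hlt : i < (r.length : Int)
  · have hlen : i < ((r.set i0.toNat v).length : Int) := by simpa using hlt
    rw [PySem.List.pyGetD_eq_getElem _ _ hi hlen,
        PySem.List.pyGetD_eq_getElem _ _ hi hlt]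
    rw [List.getElem_set]
    by_cases he : i = i0
    · simp [he]
    · have : ¬ (i0.toNat = i.toNat) := by omega
      simp [this, he]
  · have hge : (r.length : Int) ≤ i := by omega
    have hne : ¬ (i = i0) := by omega
    rw [if_neg hne]
    rw [pv_pyGetD_oob _ _ (by simpa using hge), pv_pyGetD_oob _ _ hge]

theorem pv_pyGetD_replicate0 (k : Nat) (i : Int) (hi : 0 ≤ i) :
    PySem.List.pyGetD (List.replicate k (0 : Int)) i 0 = 0 := by
  rw [show i = ((i.toNat : Nat) : Int) by omega, PySem.List.pyGetD_natCast]
  simp only [List.getD, List.getElem?_replicate]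
  split <;> rfl

def pvCells (n m : Int) : List (Int × Int) :=
  (PySem.List.pyRange 0 n 1).flatMap (fun i => (PySem.List.pyRange 0 m 1).map (fun j => (i, j)))

theorem pv_mem_cells (n m : Int) (p : Int × Int) :
    p ∈ pvCells n m ↔ (0 ≤ p.1 ∧ p.1 < n) ∧ (0 ≤ p.2 ∧ p.2 < m) := by
  simp only [pvCells, List.mem_flatMap, List.mem_map, PySem.List.mem_pyRange_one]
  constructor
  · rintro ⟨i, hi, j, hj, rfl⟩; exact ⟨hi, hj⟩
  · rintro ⟨h1, h2⟩; exact ⟨p.1, h1, p.2, h2, rfl⟩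

theorem pv_cells_nodup (n m : Int) : (pvCells n m).Nodup := by
  have h : pvCells n m = (PySem.List.pyRange 0 n 1) ×ˢ (PySem.List.pyRange 0 m 1) := rfl
  rw [h]
  exact List.Nodup.product (PySem.List.nodup_pyRange_one 0 n) (PySem.List.nodup_pyRange_one 0 m)

theorem pv_loop1_spec (a : List (List Int)) (maxA : Int) (L : List (Int × Int)) :
    ∀ (cnt : Int) (r c : List Int),
    (∀ p ∈ L, 0 ≤ p.1 ∧ p.1 < (r.length : Int) ∧ 0 ≤ p.2 ∧ p.2 < (c.length : Int)) →
    (let st := L.foldl (fun st p =>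
        if pvVal a p.1 p.2 == maxA then
          (st.1 + 1,
           PySem.List.pySetD st.2.1 p.1 (PySem.List.pyGetD st.2.1 p.1 0 + 1),
           PySem.List.pySetD st.2.2 p.2 (PySem.List.pyGetD st.2.2 p.2 0 + 1))
        else st) (cnt, r, c)
     st.1 = cnt + (L.countP (fun p => pvVal a p.1 p.2 == maxA) : Int)
     ∧ (∀ i : Int, 0 ≤ i → PySem.List.pyGetD st.2.1 i 0
          = PySem.List.pyGetD r i 0 + (L.countP (fun p => pvVal a p.1 p.2 == maxA && p.1 == i) : Int))
     ∧ (∀ j : Int, 0 ≤ j → PySem.List.pyGetD st.2.2 j 0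
          = PySem.List.pyGetD c j 0 + (L.countP (fun p => pvVal a p.1 p.2 == maxA && p.2 == j) : Int))) := by
  induction L with
  | nil => intro cnt r c _; refine ⟨by simp, ?_, ?_⟩ <;> intro i hi <;> simp
  | cons p L ih =>
    intro cnt r c hb
    have hp := hb p (by simp)
    have hbL : ∀ q ∈ L, 0 ≤ q.1 ∧ q.1 < (r.length : Int) ∧ 0 ≤ q.2 ∧ q.2 < (c.length : Int) :=
      fun q hq => hb q (by simp [hq])
    by_cases hq : (pvVal a p.1 p.2 == maxA) = true
    · have hlr : ((PySem.List.pySetD r p.1 (PySem.List.pyGetD r p.1 0 + 1)).length : Int) = (r.length : Int) := by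
        rw [PySem.List.pySetD_of_nonneg r _ hp.1]; simp
      have hlc : ((PySem.List.pySetD c p.2 (PySem.List.pyGetD c p.2 0 + 1)).length : Int) = (c.length : Int) := by
        rw [PySem.List.pySetD_of_nonneg c _ hp.2.2.1]; simp
      obtain ⟨h1, h2, h3⟩ := ih (cnt + 1)
        (PySem.List.pySetD r p.1 (PySem.List.pyGetD r p.1 0 + 1))
        (PySem.List.pySetD c p.2 (PySem.List.pyGetD c p.2 0 + 1))
        (by intro q hq'; have := hbL q hq'; omega)
      simp only [List.foldl_cons, hq, if_true]
      refine ⟨?_, ?_, ?_⟩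
      · rw [h1, List.countP_cons]
        simp only [hq, if_true]
        push_cast
        omega
      · intro i hi
        rw [h2 i hi, pv_pyGetD_pySetD r p.1 i _ hp.1 hp.2.1 hi, List.countP_cons]
        simp only [hq, Bool.true_and]
        by_cases he : i = p.1
        · subst he
          simp only [BEq.rfl, if_true]
          push_cast
          omega
        · have hne : (p.1 == i) = false := by
            simp [beq_eq_false_iff_ne]; exact fun h => he h.symm
          simp only [hne, if_neg he, Bool.false_eq_true, if_false]
          push_cast
          omega
      · intro j hj
        rw [h3 j hj, pv_pyGetD_pySetD c p.2 j _ hp.2.2.1 hp.2.2.2 hj, List.countP_cons]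
        simp only [hq, Bool.true_and]
        by_cases he : j = p.2
        · subst he
          simp only [BEq.rfl, if_true]
          push_cast
          omega
        · have hne : (p.2 == j) = false := by
            simp [beq_eq_false_iff_ne]; exact fun h => he h.symm
          simp only [hne, if_neg he, Bool.false_eq_true, if_false]
          push_cast
          omega
    · obtain ⟨h1, h2, h3⟩ := ih cnt r c hbL
      have hq' : (pvVal a p.1 p.2 == maxA) = false := by simpa using hq
      simp only [List.foldl_cons, hq', Bool.false_eq_true, if_false]
      refine ⟨?_, ?_, ?_⟩
      · rw [h1, List.countP_cons]; simp [hq']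
      · intro i hi; rw [h2 i hi, List.countP_cons]; simp [hq']
      · intro j hj; rw [h3 j hj, List.countP_cons]; simp [hq']

theorem pv_case_eq (c : Int × Int × List (List Int)) : pvCaseA c = pvSolve c.1 c.2.1 c.2.2 := by
  obtain ⟨n, m, a⟩ := c
  unfold pvCaseA pvSolve
  simp only []
  set maxA := pvMaxA n a with hmax
  set q : Int × Int → Bool := fun p => pvVal a p.1 p.2 == maxA with hqdef
  -- A's first nested loop, rewritten over the flat cell list
  have hnest :
      (PySem.List.pyRange 0 n 1).foldl (fun st i =>
        (PySem.List.pyRange 0 m 1).foldl (fun st j =>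
          if pvVal a i j == maxA then
            (st.1 + 1,
             PySem.List.pySetD st.2.1 i (PySem.List.pyGetD st.2.1 i 0 + 1),
             PySem.List.pySetD st.2.2 j (PySem.List.pyGetD st.2.2 j 0 + 1))
          else st) st)
        ((0 : Int), PySem.List.pyRepeat [(0 : Int)] n, PySem.List.pyRepeat [(0 : Int)] m)
      = (pvCells n m).foldl (fun st p =>
          if pvVal a p.1 p.2 == maxA then
            (st.1 + 1,
             PySem.List.pySetD st.2.1 p.1 (PySem.List.pyGetD st.2.1 p.1 0 + 1),
             PySem.List.pySetD st.2.2 p.2 (PySem.List.pyGetD st.2.2 p.2 0 + 1))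
          else st)
        ((0 : Int), PySem.List.pyRepeat [(0 : Int)] n, PySem.List.pyRepeat [(0 : Int)] m) := by
    rw [pvCells, pv_foldl_flatMap]
    simp only [List.foldl_map]
  rw [hnest]
  have hrep : PySem.List.pyRepeat [(0 : Int)] n = List.replicate n.toNat (0 : Int) :=
    PySem.List.pyRepeat_singleton 0 n
  have hrepm : PySem.List.pyRepeat [(0 : Int)] m = List.replicate m.toNat (0 : Int) :=
    PySem.List.pyRepeat_singleton 0 m
  obtain ⟨h1, h2, h3⟩ := pv_loop1_spec a maxA (pvCells n m) 0
    (PySem.List.pyRepeat [(0 : Int)] n) (PySem.List.pyRepeat [(0 : Int)] m)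
    (by
      intro p hp
      rw [pv_mem_cells] at hp
      rw [hrep, hrepm]
      simp only [List.length_replicate]
      omega)
  set st := (pvCells n m).foldl (fun st p =>
          if pvVal a p.1 p.2 == maxA then
            (st.1 + 1,
             PySem.List.pySetD st.2.1 p.1 (PySem.List.pyGetD st.2.1 p.1 0 + 1),
             PySem.List.pySetD st.2.2 p.2 (PySem.List.pyGetD st.2.2 p.2 0 + 1))
          else st)
        ((0 : Int), PySem.List.pyRepeat [(0 : Int)] n, PySem.List.pyRepeat [(0 : Int)] m) with hst
  -- B's position list is the filtered cell list
  have hP : (PySem.List.pyRange 0 n 1).flatMap (fun i =>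
      ((PySem.List.pyRange 0 m 1).filter (fun j => pvVal a i j == maxA)).map (fun j => (i, j)))
      = (pvCells n m).filter q := by
    rw [pvCells, List.filter_flatMap]
    simp only [List.filter_map]
    rfl
  rw [hP]
  -- collapse A's second loop (with break) into an if-any form
  simp only [pv_scanJ_eq, pv_foldl_if_const]
  -- the two cover tests agree cell by cell
  have hcond : ∀ i ∈ PySem.List.pyRange 0 n 1, ∀ j ∈ PySem.List.pyRange 0 m 1,
      (PySem.List.pyGetD st.2.1 i 0 + PySem.List.pyGetD st.2.2 j 0
        - (if pvVal a i j == maxA then 1 else 0) == st.1)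
      = ((pvCells n m).filter q).all (fun p => p.1 == i || p.2 == j) := by
    intro i hi j hj
    rw [PySem.List.mem_pyRange_one] at hi hj
    have hij : (i, j) ∈ pvCells n m := by rw [pv_mem_cells]; exact ⟨hi, hj⟩
    have hR : (pvCells n m).countP (fun p => pvVal a p.1 p.2 == maxA && p.1 == i)
        = ((pvCells n m).filter q).countP (fun p => p.1 == i) := by
      rw [List.countP_filter]
      congr 1
      funext p
      exact (Bool.and_comm _ _).symm
    have hC : (pvCells n m).countP (fun p => pvVal a p.1 p.2 == maxA && p.2 == j)
        = ((pvCells n m).filter q).countP (fun p => p.2 == j) := by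
      rw [List.countP_filter]
      congr 1
      funext p
      exact (Bool.and_comm _ _).symm
    have hN : (pvCells n m).countP (fun p => pvVal a p.1 p.2 == maxA)
        = ((pvCells n m).filter q).length := by
      rw [List.countP_eq_length_filter]
    have hunion := pv_countP_union ((pvCells n m).filter q)
      (fun p => p.1 == i) (fun p => p.2 == j)
    have hand : ((pvCells n m).filter q).countP (fun p => p.1 == i && p.2 == j)
        = if pvVal a i j == maxA then 1 else 0 := by
      have hbeq : (fun p : Int × Int => p.1 == i && p.2 == j)
          = (fun p : Int × Int => p == (i, j)) := by
        funext p
        rfl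
      rw [hbeq,
        show ((pvCells n m).filter q).countP (fun p : Int × Int => p == (i, j))
          = ((pvCells n m).filter q).count (i, j) from rfl]
      by_cases hq0 : q (i, j) = true
      · rw [if_pos hq0, List.count_filter hq0]
        exact List.count_eq_one_of_mem (pv_cells_nodup n m) hij
      · have h0 : (pvVal a i j == maxA) = false := by simpa [hqdef] using hq0
        rw [h0, if_neg (by simp), List.count_eq_zero]
        intro hmem
        exact hq0 ((List.mem_filter.mp hmem).2)
    have hUle : ((pvCells n m).filter q).countP (fun p => p.1 == i || p.2 == j)
        ≤ ((pvCells n m).filter q).length := List.countP_le_length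
    have hall : (((pvCells n m).filter q).countP (fun p => p.1 == i || p.2 == j)
          = ((pvCells n m).filter q).length)
        ↔ (((pvCells n m).filter q).all (fun p => p.1 == i || p.2 == j) = true) := by
      rw [List.all_eq_true]
      exact List.countP_eq_length
    rw [Bool.eq_iff_iff, beq_iff_eq]
    rw [h1, h2 i hi.1, h3 j hj.1]
    rw [hrep, pv_pyGetD_replicate0 _ _ hi.1, hrepm, pv_pyGetD_replicate0 _ _ hj.1]
    rw [hR, hC, hN, ← hall]
    by_cases hq0 : (pvVal a i j == maxA) = true
    · rw [if_pos hq0] at hand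
      rw [if_pos hq0]
      constructor <;> intro heq <;> omega
    · rw [if_neg hq0] at hand
      rw [if_neg hq0]
      constructor <;> intro heq <;> omega
  -- finish: both sides are the same if-any expression
  have hany : ((PySem.List.pyRange 0 n 1).any (fun i => (PySem.List.pyRange 0 m 1).any (fun j =>
      PySem.List.pyGetD st.2.1 i 0 + PySem.List.pyGetD st.2.2 j 0
        - (if pvVal a i j == maxA then 1 else 0) == st.1)))
      = ((PySem.List.pyRange 0 n 1).any (fun i => (PySem.List.pyRange 0 m 1).any (fun j =>
          ((pvCells n m).filter q).all (fun p => p.1 == i || p.2 == j)))) := by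
    apply pv_any_congr_mem
    intro i hi
    apply pv_any_congr_mem
    intro j hj
    exact hcond i hi j hj
  rw [hany]

-- ===== VERDICT (by name: the statement is the Claim_ definition above) =====
theorem ourfunc_spec : Claim_equal_ourfunc := by
  intro t tcs _ _
  unfold Spec_ourfunc ourfunc ourfunc_alt
  rw [PySem.List.foldl_append_singleton_eq_map]
  simp [pv_case_eq]
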